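/- GENERATED by mk_final_copies.py from the proof of the farm's unit `setup_temp_malloc` (farm:setup_temp_malloc.2: Proof.lean) as the
   re-elaboration sweep compiled it — do not edit. -/
import Asan.CheckWalk
import Vorbis.Spec.Units.setup_temp_malloc

open X86 X86.User Asan Vorbis Vorbis.Spec

set_option maxRecDepth 4000
set_option maxHeartbeats 4000000
set_option linter.unusedSimpArgs false

namespace Vorbis.Spec.setup_temp_malloc
open X86.Insn

/-- The walker's form of `add r13d, 0x20 ; mov eax, r14d ; sub eax, r13d` (the new `temp_offset`, `T − (r8 sz + 32)`) for a
request that fits: nothing wraps. -/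
theorem newT_toNat {A : Arena} (hb : A.S ≤ A.T ∧ A.T ≤ A.L ∧ A.L ≤ 0xB00000 ∧ A.B + A.L ≤ 0xC00000) (x : BitVec 32)
    (h1 : x.toNat ≤ 0x7FFFFFF8) (hfit : A.Fits x.toNat) :
    (BitVec.ofNat 32 A.T -
      ((BitVec.setWidth 32 (Word.ofBV x + 7).toBitVec &&& 4294967288#32) + 32#32)).toNat =
        A.T - (r8 x.toNat + 32) := by
  have er := r8_lea x h1
  have eT := toNat_ofNat32 A.T (by omega)
  have e32 : (32#32).toNat = 32 := by decide
  unfold Arena.Fits at hfit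
  rw [BitVec.toNat_sub, BitVec.toNat_add, er, eT, e32]
  omega

/-- The walker's form of `cdqe ; add r12, rax` (the new block, `B + T'`) for a request that fits. -/
theorem ptr_toNat {A : Arena} (hb : A.S ≤ A.T ∧ A.T ≤ A.L ∧ A.L ≤ 0xB00000 ∧ A.B + A.L ≤ 0xC00000) (x : BitVec 32)
    (h1 : x.toNat ≤ 0x7FFFFFF8) (hfit : A.Fits x.toNat) :
    (UInt64.ofNat A.B + Word.ofBV (BitVec.signExtend 64 (BitVec.ofNat 32 A.T -
      ((BitVec.setWidth 32 (Word.ofBV x + 7).toBitVec &&& 4294967288#32) + 32#32)))).toNat =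
        A.B + (A.T - (r8 x.toNat + 32)) := by
  have e1 := newT_toNat hb x h1 hfit
  have e2 : (UInt64.ofNat A.B).toNat = A.B := by
    have hsz : UInt64.size = 2 ^ 64 := rfl
    exact UInt64.toNat_ofNat_of_lt (by omega)
  have h31 : (BitVec.ofNat 32 A.T -
      ((BitVec.setWidth 32 (Word.ofBV x + 7).toBitVec &&& 4294967288#32) + 32#32)).toNat < 2 ^ 31 := by
    rw [e1]
    omega
  rw [UInt64.toNat_add, e2, toNat_sext32 _ h31, e1]
  omega

/-- `cbw / cwde / cdqe` (the model's `X86.Insn.CBW_CWDE_CDQE.cbw`, the `cdqe` at 0x108e6f) with a `match` of THIS namespace: the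
stepper evaluates the `match` on the operand size with the matcher's equation lemmas, which Lean makes on demand in the
module that asks first. For the model's own matcher these would be declarations named `X86.Insn.CBW_CWDE_CDQE.cbw.…` in this
file (outside the unit's namespace: the verdict refuses them); for this copy they are named `Vorbis.Spec.setup_temp_malloc.cbwAlt.…`. -/
def cbwAlt (e : Encoding) : Sem Unit := do
  Encoding.checkNoLock e
  match Width.ofBits (← operandBits e) with
  | .w16 => put (.gprT .w16 .rax) ((← get (.gprT .w8 .rax)).signExtend 16)
  | .w32 => put (.gprT .w32 .rax) ((← get (.gprT .w16 .rax)).signExtend 32)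
  | _    => put (.gprT .w64 .rax) ((← get (.gprT .w32 .rax)).signExtend 64)

/-- The copy IS the model's instruction, by definition (both matchers unfold to the same case analysis). Given to the walk as a
`↓` rewrite rule, so that it fires before the stepping set unfolds `cbw`. -/
theorem cbw_eq_alt (e : Encoding) : X86.Insn.CBW_CWDE_CDQE.cbw e = cbwAlt e := id rfl

end Vorbis.Spec.setup_temp_malloc

/-- `setup_temp_malloc(f, sz)` satisfies its contract. One walk from the entry (0x108dc0) over FIX A's three tests
(stb_vorbis_fixed.c:984, :988): the `malloc` arm is pruned (`alloc_buffer = A.B ≠ 0`), the three refusing arms return 0 with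
nothing but stack written (`not_fits_of_big`, `not_fits_of_guard`, `not_fits_of_exact`), the success arm stores the new
`temp_offset` and calls `arena_unpoison(p, size)` (0x108e7a, :991). After that cut point: the stack slots and the stored field are
carried over the callee's footprint (shadow bytes only), a second walk pops and returns; the post is `ArenaOK.temp_malloc` +
`ArenaOK.shadow_temp_malloc`. -/
theorem Vorbis.Spec.Worked.setup_temp_malloc_ok : Vorbis.Spec.setup_temp_malloc.Statement := by
  intro Lay hLay μ hμ u₀ hcode hload8 hload4 hunp hmalloc others frames A u ret he hpre
  v_entry he
  have hmalloc' := hmalloc others frames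
  have hsh := hpre.shadow
  have hA := hpre.arena
  have hb := hA.bounds
  have hsp := hsh.rsp
  have hwhere := hpre.obj.where_ hsh.inv hsh.offText (by omega)
  -- where `*f` is: one arithmetic fact (data space, off the text, off this function's stack)
  have hf : (u.reg .rdi).toNat + Off.sizeof.stb_vorbis ≤ 2 ^ 64 := by
    simp only [voff]
    omega
  have hxn : (Word.part .w32 (u.reg .rsi)).toNat = (u.reg .rsi).toNat % 2 ^ 32 := part32_toNat _
  -- `alloc_buffer ≠ 0`: with these two facts the walk prunes the `malloc` arm (0x108e91) at both `test r12, r12`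
  have hBpos : (UInt64.ofNat A.B).toNat = A.B := by
    have : UInt64.size = 2 ^ 64 := rfl
    exact UInt64.toNat_ofNat_of_lt (by omega)
  have hB0 := hA.AR1.2.1
  -- the three loads of `*f`, as rewrite rules of the walk: the branch conditions speak of A.B, A.S, A.T
  have r1 := hpre.read_buffer
  have r2 := hpre.read_setup
  have r3 := hpre.read_temp
  u_walk hcode [hμ.vendor, ↓ setup_temp_malloc.cbw_eq_alt, setup_temp_malloc.cbwAlt] span [Vorbis.L.textLo, Vorbis.L.textHi]
    side (v_side)
  -- the five check sites (load8 f+112; load4 f+132, f+128 twice): inside `*f`, no store so far went to the shadow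
  case check_108de3 =>
    exact hpre.obj.accSmall hsh.inv (by v_untouched) _ 8 (by decide) (by u_omega) (by u_omega)
  case check_108df8 =>
    exact hpre.obj.accSmall hsh.inv (by v_untouched) _ 4 (by decide) (by u_omega) (by u_omega)
  case check_108e0b =>
    exact hpre.obj.accSmall hsh.inv (by v_untouched) _ 4 (by decide) (by u_omega) (by u_omega)
  case check_108e34 =>
    exact hpre.obj.accSmall hsh.inv (by v_untouched) _ 4 (by decide) (by u_omega) (by u_omega)
  case check_108e51 =>
    exact hpre.obj.accSmall hsh.inv (by v_untouched) _ 4 (by decide) (by u_omega) (by u_omega)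
  case call_inv => v_inv
  -- 0x108e7a `call arena_unpoison` (:991): its precondition, from `ArenaOK.newTemp_facts`
  case pre_108e7a =>
    have hfit : A.Fits (Word.part .w32 (u.reg .rsi)).toNat :=
      setup_temp_malloc.fits_of_tests hb _ hbr_108dd4 hbr_108e1a hbr_108e5d
    obtain ⟨f1, f2, f3, f4⟩ := hA.newTemp_facts _ hfit
    have ep := setup_temp_malloc.ptr_toNat hb _ hbr_108dd4 hfit
    have en : (s_108e7a.reg .rsi).toNat = (Word.part .w32 (u.reg .rsi)).toNat := by
      rw [w_rsi]
      exact toNat_sext32 _ (by omega)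
    show (s_108e7a.reg .rdi).toNat % 8 = 0 ∧ 0x100000 ≤ (s_108e7a.reg .rdi).toNat ∧
      (s_108e7a.reg .rdi).toNat + (s_108e7a.reg .rsi).toNat ≤ 0xC00000
    rw [en, w_rdi, ep]
    exact ⟨f1, f2, f3⟩
  · -- 0x108e9e: FIX A's first test refused the request
    refine ReachVia.done ?_
    v_returned
    have hnf : ¬ A.Fits ((u.reg .rsi).toNat % 2 ^ 32) := by
      rw [← hxn]
      exact not_fits_of_big hA _ hbr_108dd4
    refine ⟨fun hfit => absurd hfit hnf, fun _ => ⟨w_rax, ?_, by v_untouched, ?_⟩⟩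
    · apply hA.frame hf
      simp only [voff]
      u_memnorm
      u_eqon
    · -- the footprint of a failed call (last conjunct of the failure clause, freeze-9): nothing but the 80 bytes of stack
      u_same
  · -- 0x108ea6: the guard
    refine ReachVia.done ?_
    v_returned
    have hnf : ¬ A.Fits ((u.reg .rsi).toNat % 2 ^ 32) := by
      rw [← hxn]
      exact setup_temp_malloc.not_fits_of_guard hb _ hbr_108dd4 hbr_108e1a
    refine ⟨fun hfit => absurd hfit hnf, fun _ => ⟨w_rax, ?_, by v_untouched, ?_⟩⟩
    · apply hA.frame hf
      simp only [voff]
      u_memnorm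
      u_eqon
    · -- the footprint of a failed call (last conjunct of the failure clause, freeze-9): nothing but the 80 bytes of stack
      u_same
  · -- 0x108eae: the exact-fit test
    refine ReachVia.done ?_
    v_returned
    have hnf : ¬ A.Fits ((u.reg .rsi).toNat % 2 ^ 32) := by
      rw [← hxn]
      exact setup_temp_malloc.not_fits_of_exact hb _ hbr_108dd4 hbr_108e1a hbr_108e5d
    refine ⟨fun hfit => absurd hfit hnf, fun _ => ⟨w_rax, ?_, by v_untouched, ?_⟩⟩
    · apply hA.frame hf
      simp only [voff]
      u_memnorm
      u_eqon
    · -- the footprint of a failed call (last conjunct of the failure clause, freeze-9): nothing but the 80 bytes of stack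
      u_same
  · -- 0x108e7f: the success path, after `arena_unpoison(p, size)`
    have hfit : A.Fits (Word.part .w32 (u.reg .rsi)).toNat :=
      setup_temp_malloc.fits_of_tests hb _ hbr_108dd4 hbr_108e1a hbr_108e5d
    obtain ⟨f1, f2, f3, f4⟩ := hA.newTemp_facts _ hfit
    have ep := setup_temp_malloc.ptr_toNat hb _ hbr_108dd4 hfit
    have et := setup_temp_malloc.newT_toNat hb _ hbr_108dd4 hfit
    have en : (s_108e7a.reg .rsi).toNat = (Word.part .w32 (u.reg .rsi)).toNat := by
      rw [w_rsi_108e7a]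
      exact toNat_sext32 _ (by omega)
    have ed : (s_108e7a.reg .rdi).toNat =
        A.B + (A.T - (r8 (Word.part .w32 (u.reg .rsi)).toNat + 32)) := by
      rw [w_rdi_108e7a, ep]
    obtain ⟨hmem, hkeep⟩ := w_post
    rw [ed, en] at hmem
    have hfitU := hfit
    unfold Arena.Fits at hfitU
    -- the request and the new block, as numbers
    obtain ⟨n, hn⟩ : ∃ n : Nat, (Word.part .w32 (u.reg .rsi)).toNat = n := ⟨_, rfl⟩
    rw [hn] at hfit hfitU ep et hmem hxn f1 f2 f3 f4
    obtain ⟨p, hp⟩ : ∃ p : Nat, A.B + (A.T - (r8 n + 32)) = p := ⟨_, rfl⟩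
    have g1 : p % 8 = 0 := by
      rw [← hp]
      exact f1
    have g2 : 0x100000 ≤ p := by
      rw [← hp]
      exact f2
    have g3 : p + n ≤ 0xC00000 := by
      rw [← hp]
      exact f3
    rw [hp] at hmem ep
    clear w_same
    have w_same : Mem.SameExcept [⟨0xC00000 + p / 8, 0xC00000 + (p + n + 7) / 8⟩] s_108e7a.mem s_108e7ar.mem := by
      have := unpoisonMem_sameExcept s_108e7a.mem p n g1 g3
      unfold shadowSpan at this
      rw [hmem]
      exact this
    have hq0 : UInt64.ofNat (s_108e7a.mem.readLE (u.reg .rsp) 8) = ret := by u_resolve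
    have hq1 : UInt64.ofNat (s_108e7a.mem.readLE (u.reg .rsp - 8) 8) = u.reg .r15 := by u_resolve
    have hq2 : UInt64.ofNat (s_108e7a.mem.readLE (u.reg .rsp - 16) 8) = u.reg .r14 := by u_resolve
    have hq3 : UInt64.ofNat (s_108e7a.mem.readLE (u.reg .rsp - 24) 8) = u.reg .r13 := by u_resolve
    have hq4 : UInt64.ofNat (s_108e7a.mem.readLE (u.reg .rsp - 32) 8) = u.reg .r12 := by u_resolve
    have hq5 : UInt64.ofNat (s_108e7a.mem.readLE (u.reg .rsp - 40) 8) = u.reg .rbp := by u_resolve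
    have hq6 : UInt64.ofNat (s_108e7a.mem.readLE (u.reg .rsp - 48) 8) = u.reg .rbx := by u_resolve
    have hq7 : s_108e7a.mem.readLE (u.reg .rdi + 132) 4 = A.T - (r8 n + 32) := by
      rw [← et]
      u_resolve
      exact Nat.mod_eq_of_lt (BitVec.isLt _)
    have hun : ShadowUntouched u.mem s_108e7a.mem := by v_untouched
    have hdata : Mem.EqOn ((u.reg .rdi).toNat + 112) ((u.reg .rdi).toNat + 132) u.mem s_108e7a.mem := by
      u_memnorm
      u_eqon
    -- across the callee: its footprint is shadow bytes only
    have w_eq := Vorbis.conv_code_eqOn w_code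
    have w_df := (show X86.User.abiInv _ from w_inv).1
    have w_mx := (show X86.User.abiInv _ from w_inv).2
    have w_sse := Vorbis.sseOK_of_abiInv w_inv
    have hs0 : UInt64.ofNat (s_108e7ar.mem.readLE (u.reg .rsp) 8) = ret :=
      Mem.ofNat_readLE_frame hq0 (by u_eqon) (by u_omega)
    have hs1 : UInt64.ofNat (s_108e7ar.mem.readLE (u.reg .rsp - 8) 8) = u.reg .r15 :=
      Mem.ofNat_readLE_frame hq1 (by u_eqon) (by u_omega)
    have hs2 : UInt64.ofNat (s_108e7ar.mem.readLE (u.reg .rsp - 16) 8) = u.reg .r14 :=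
      Mem.ofNat_readLE_frame hq2 (by u_eqon) (by u_omega)
    have hs3 : UInt64.ofNat (s_108e7ar.mem.readLE (u.reg .rsp - 24) 8) = u.reg .r13 :=
      Mem.ofNat_readLE_frame hq3 (by u_eqon) (by u_omega)
    have hs4 : UInt64.ofNat (s_108e7ar.mem.readLE (u.reg .rsp - 32) 8) = u.reg .r12 :=
      Mem.ofNat_readLE_frame hq4 (by u_eqon) (by u_omega)
    have hs5 : UInt64.ofNat (s_108e7ar.mem.readLE (u.reg .rsp - 40) 8) = u.reg .rbp :=
      Mem.ofNat_readLE_frame hq5 (by u_eqon) (by u_omega)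
    have hs6 : UInt64.ofNat (s_108e7ar.mem.readLE (u.reg .rsp - 48) 8) = u.reg .rbx :=
      Mem.ofNat_readLE_frame hq6 (by u_eqon) (by u_omega)
    have hs7 : s_108e7ar.mem.readLE (u.reg .rdi + 132) 4 = A.T - (r8 n + 32) :=
      Mem.readLE_frame hq7 (by u_eqon) (by u_omega)
    have hdata' : Mem.EqOn ((u.reg .rdi).toNat + 112) ((u.reg .rdi).toNat + 132) s_108e7a.mem s_108e7ar.mem := by
      u_eqon
    -- (reversed, so that the walk does not take it for the memory of `s_108e7ar`: the slot facts above are what it reads)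
    have hmem' : unpoisonMem s_108e7a.mem p n = s_108e7ar.mem := hmem.symm
    clear hmem
    u_walk hcode [hμ.vendor] span [Vorbis.L.textLo, Vorbis.L.textHi] side (v_side)
    refine ReachVia.done ?_
    v_returned
    · -- the post: the request fits; rax = B + T', the arena layer and the shadow layer with the new block
      show (A.Fits ((u.reg .rsi).toNat % 2 ^ 32) → _) ∧ (¬ A.Fits ((u.reg .rsi).toNat % 2 ^ 32) → _)
      rw [← hxn]
      refine ⟨fun _ => ⟨?_, ?_, ?_⟩, fun hnf => absurd hfit hnf⟩
      · -- the returned pointer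
        rw [w_rax, ep]
        exact hp.symm
      · -- ArenaOK: AR5 from the stored `temp_offset`, the other three fields read the same
        apply hA.temp_malloc n hfit
        apply hA.AR5.set_temp hf (A.pushTemp n) rfl rfl rfl
        · simp only [voff]
          rw [w_mem]
          exact hdata.trans hdata'
        · simp only [vacc, voff, varena]
          have hfield : s_108e90.mem.u32 ((u.reg .rdi).toNat + 132) = A.T - (r8 n + 32) := by
            rw [Mem.u32, ← addr_add_lit, addr_toNat, w_mem]
            exact hs7
          rw [Mem.i32_def, hfield]
          have hc := sint32_cases (A.T - (r8 n + 32))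
          omega
      · -- ShadowInv: the shadow at the call is the entry's; `arena_unpoison` adds the block
        have hinv1 := hsh.inv.untouched hun
        have hinv2 := hA.shadow_temp_malloc hinv1 n hfit
        rw [hp, hmem'] at hinv2
        rw [w_mem]
        exact hinv2
    · -- the footprint: the stack, `temp_offset`, the shadow of the new block
      simp only [X86.User.Spec.footprint, vspec, shadowSpan]
      rw [← hxn, hp]
      u_same
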